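-- pv_equiv track=rewrite | github.com/rowannekabalan/advent-of-code-2024 | day7/main.py | eval_ltr
-- ===== SOURCE A (Python) =====
-- import operator
--
-- def eval_ltr(operands, operators):
--     ops = {
--         '+' : operator.add,
--         '*' : operator.mul,
--         '||': lambda x, y: int(str(x) + str(y))
--     }
--
--     result = operands[0]
--     for i in range(len(operands)-1):
--         result = ops[operators[i]](result, operands[i+1])
--     return result
-- ===== SOURCE B (Python) =====
-- import operator
--
-- def eval_ltr(operands, operators):
--     ops = {
--         '+' : operator.add,
--         '*' : operator.mul,
--         '||': lambda x, y: int(str(x) + str(y))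
--     }
--
--     def go(acc, ops_left, vals):
--         if not ops_left or not vals:
--             return acc
--         return go(ops[ops_left[0]](acc, vals[0]), ops_left[1:], vals[1:])
--
--     return go(operands[0], operators, operands[1:])
-- ===== Notes on version B (the rewrite author's own statement) =====
-- stated objective: alternative
-- what changed: Replaces the index loop over range(len(operands)-1) with a direct structural recursion over the operator/operand lists (no index arithmetic, no len-based range).
import Mathlib
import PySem

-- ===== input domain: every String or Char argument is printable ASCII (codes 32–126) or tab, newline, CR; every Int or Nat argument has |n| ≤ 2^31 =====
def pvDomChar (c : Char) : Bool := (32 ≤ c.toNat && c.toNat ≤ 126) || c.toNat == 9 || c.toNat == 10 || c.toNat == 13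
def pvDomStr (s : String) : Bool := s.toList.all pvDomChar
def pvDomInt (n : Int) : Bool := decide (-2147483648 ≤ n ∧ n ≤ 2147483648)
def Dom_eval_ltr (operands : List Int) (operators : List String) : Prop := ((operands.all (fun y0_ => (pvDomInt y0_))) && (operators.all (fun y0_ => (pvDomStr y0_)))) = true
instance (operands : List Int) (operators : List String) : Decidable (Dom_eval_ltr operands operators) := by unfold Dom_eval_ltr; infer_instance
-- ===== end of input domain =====

-- B is a structural recursion over the lists instead of A's index loop; equivalence is about the return value.

-- shared dispatch: the `ops` dict both Pythons build ('||' is int(str(x)+str(y)); 0 = KeyError, excluded by Pre_)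
def pvOp (op : String) (x y : Int) : Int :=
  if op = "+" then x + y
  else if op = "*" then x * y
  else if op = "||" then (PySem.Int.ofChars? (PySem.Int.toChars x ++ PySem.Int.toChars y)).getD 0
  else 0

-- ===== PORT A =====
-- 'for i in range(len(operands)-1): result = ops[operators[i]](result, operands[i+1])' as a counter recursion
def evalLoopA (operands : List Int) (operators : List String) : Nat → Nat → Int → Int
  | _, 0, r => r
  | i, k+1, r =>
      evalLoopA operands operators (i+1) k
        (pvOp (PySem.List.pyGetD operators (i : Int) "") r (PySem.List.pyGetD operands ((i : Int) + 1) 0))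

def eval_ltr (operands : List Int) (operators : List String) : Int :=
  evalLoopA operands operators 0 (operands.length - 1) (PySem.List.pyGetD operands 0 0)

-- ===== PORT B =====
def evalGoB (acc : Int) (opsLeft : List String) (vals : List Int) : Int :=
  match opsLeft, vals with
  | o :: os, v :: vs => evalGoB (pvOp o acc v) os vs
  | _, _ => acc

def eval_ltr_alt (operands : List Int) (operators : List String) : Int :=
  match operands with
  | [] => 0   -- Python raises IndexError on operands[0]; outside Pre_
  | x :: rest => evalGoB x operators rest

-- ===== PRECONDITION & SPEC =====
-- Pre_ excludes exactly where Python A raises: empty operands (IndexError on operands[0]),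
-- too few operators (IndexError), an operator outside the ops dict (KeyError), and
-- '||' applied to a negative right operand (ValueError in int(str(x)+str(y))).
def Pre_eval_ltr (operands : List Int) (operators : List String) : Prop :=
  operands ≠ [] ∧ operands.length - 1 ≤ operators.length ∧
  ∀ i < operands.length - 1,
    operators.getD i "" = "+" ∨ operators.getD i "" = "*" ∨
    (operators.getD i "" = "||" ∧ 0 ≤ operands.getD (i+1) 0)
instance (operands : List Int) (operators : List String) : Decidable (Pre_eval_ltr operands operators) := by
  unfold Pre_eval_ltr; infer_instance

def pvWitness_eval_ltr : List Int × List String := ([2, 3, 4], ["+", "||"])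

def Spec_eval_ltr (operands : List Int) (operators : List String) (out : Int) : Prop := out = eval_ltr_alt operands operators
instance (operands : List Int) (operators : List String) (out : Int) : Decidable (Spec_eval_ltr operands operators out) := by unfold Spec_eval_ltr; infer_instance

-- ===== CLAIM (what is proved, stated in full; the proofs are below) =====
def Claim_equal_eval_ltr : Prop := ∀ (operands : List Int) (operators : List String), Dom_eval_ltr operands operators → Pre_eval_ltr operands operators → Spec_eval_ltr operands operators (eval_ltr operands operators)

-- ===== LEMMAS AND PROOFS =====

-- A's counter loop, started at index i with exactly the remaining k steps, is B's recursion on the dropped lists.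
lemma evalLoopA_eq_evalGoB (k : Nat) : ∀ (i : Nat) (operands : List Int) (operators : List String) (r : Int),
    i + k ≤ operators.length → operands.length = i + 1 + k →
    evalLoopA operands operators i k r = evalGoB r (operators.drop i) (operands.drop (i+1)) := by
  induction k with
  | zero =>
      intro i operands operators r _ hlen
      have : operands.drop (i+1) = [] := by
        apply List.drop_eq_nil_of_le; omega
      cases h : operators.drop i <;> simp [evalLoopA, this, evalGoB]
  | succ k ih =>
      intro i operands operators r hops hlen
      have hio : i < operators.length := by omega
      have hiv : i + 1 < operands.length := by omega
      have hdo : operators.drop i = operators[i] :: operators.drop (i+1) :=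
        (List.getElem_cons_drop hio).symm
      have hdv : operands.drop (i+1) = operands[i+1] :: operands.drop (i+2) :=
        (List.getElem_cons_drop hiv).symm
      have hgo : PySem.List.pyGetD operators (i : Int) "" = operators[i] := by
        rw [PySem.List.pyGetD_natCast, List.getD_eq_getElem?_getD, List.getElem?_eq_getElem hio]
        rfl
      have hgv : PySem.List.pyGetD operands ((i : Int) + 1) 0 = operands[i+1] := by
        have : ((i : Int) + 1) = ((i + 1 : Nat) : Int) := by push_cast; ring
        rw [this, PySem.List.pyGetD_natCast, List.getD_eq_getElem?_getD,
            List.getElem?_eq_getElem hiv]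
        rfl
      rw [evalLoopA, hgo, hgv, hdo, hdv, evalGoB]
      exact ih (i+1) operands operators _ (by omega) (by omega)

-- ===== VERDICT (by name: the statement is the Claim_ definition above) =====
theorem eval_ltr_spec : Claim_equal_eval_ltr := by
  intro operands operators _ hpre
  obtain ⟨hne, hlen, _⟩ := hpre
  unfold Spec_eval_ltr
  obtain ⟨x, rest, rfl⟩ : ∃ x rest, operands = x :: rest := by
    cases operands with
    | nil => exact absurd rfl hne
    | cons x rest => exact ⟨x, rest, rfl⟩
  have hlen' : (x :: rest).length - 1 = rest.length := by simp
  unfold eval_ltr eval_ltr_alt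
  rw [hlen', PySem.List.pyGetD_zero_cons,
      evalLoopA_eq_evalGoB rest.length 0 (x :: rest) operators x
        (by simpa using (hlen' ▸ hlen)) (by simp; omega)]
  simp
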